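-- pv_equiv track=rewrite | github.com/yj0903/python-for-coding-test | 3.other/zerobase_week4/test3.py | solution
-- ===== SOURCE A (Python) =====
-- def solution(words, queries):
--     answer = list()
--
--     for query in queries:
--         solve = list()
--         for word in words:
--
--             # 글자수 다르면 안됨
--             if len(query) != len(word):
--                 continue
--
--             right = True
--             for i in range(len(query)):
--                 if query[i] == '?':
--                     break
--                 if query[i] != word[i]:
--                     right = False
--                     break
--
--             # 단어가 해당 됨.
--             if right:
--                 solve.append(word)
--         answer.append(solve)
--     return answer
-- ===== SOURCE B (Python) =====
-- def solution(words, queries):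
--     # Group words by length once; each query only scans its own length bucket,
--     # matching the prefix before the first '?' with startswith.
--     by_len = {}
--     for w in words:
--         by_len.setdefault(len(w), []).append(w)
--     answer = []
--     for q in queries:
--         prefix = ''
--         for c in q:
--             if c == '?':
--                 break
--             prefix += c
--         answer.append([w for w in by_len.get(len(q), []) if w.startswith(prefix)])
--     return answer
-- ===== Notes on version B (the rewrite author's own statement) =====
-- stated objective: faster
-- what changed: B groups the words by length into a dict once and answers each query by filtering only its own length bucket with startswith on the prefix before the first '?', instead of A's per-query scan of all words with a hand-written per-character loop.
import Mathlib
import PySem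

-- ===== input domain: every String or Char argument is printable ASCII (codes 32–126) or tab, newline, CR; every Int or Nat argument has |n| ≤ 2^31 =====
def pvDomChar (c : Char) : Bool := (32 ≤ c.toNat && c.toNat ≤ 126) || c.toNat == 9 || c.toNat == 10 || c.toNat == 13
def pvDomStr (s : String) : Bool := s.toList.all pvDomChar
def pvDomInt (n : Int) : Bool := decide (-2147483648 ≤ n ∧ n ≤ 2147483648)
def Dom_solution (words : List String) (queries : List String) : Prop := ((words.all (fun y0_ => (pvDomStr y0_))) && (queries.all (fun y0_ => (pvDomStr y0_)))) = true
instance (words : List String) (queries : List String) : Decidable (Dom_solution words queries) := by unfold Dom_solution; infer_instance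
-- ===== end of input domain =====

-- B groups words by length into a dict once and answers each query from its length
-- bucket via startswith on the prefix before the first '?' (objective: faster).


-- ===== PORT A =====
-- A's inner character loop: for i in range(len(query)): break on '?', break with
-- right=False on mismatch.  It is only entered with len(query) == len(word), so the
-- paired structural recursion visits exactly the same characters.
def pvRight : List Char → List Char → Bool
  | [], _ => true
  | _ :: _, [] => true
  | qc :: qs, wc :: ws =>
      if qc = '?' then true
      else if qc ≠ wc then false
      else pvRight qs ws

def solution (words : List String) (queries : List String) : List (List String) :=
  queries.foldl (fun answer query =>
    answer ++ [words.foldl (fun solve word =>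
      if PySem.Str.len query ≠ PySem.Str.len word then solve
      else if pvRight query.toList word.toList then solve ++ [word]
      else solve) []]) []

-- ===== PORT B =====
-- prefix accumulated char by char until the first '?' (the Python loop with break)
def pvPrefix : List Char → List Char
  | [] => []
  | c :: cs => if c = '?' then [] else c :: pvPrefix cs

-- by_len.setdefault(len(w), []).append(w)  ≡  by_len[len(w)] = by_len.get(len(w), []) ++ [w],
-- which is exactly Dict.modify (exact on the dict value and key order)
def solution_alt (words : List String) (queries : List String) : List (List String) :=
  let byLen := words.foldl (fun d w => d.modify (PySem.Str.len w) [] (fun l => l ++ [w])) PySem.Dict.empty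
  queries.foldl (fun answer q =>
    answer ++ [(byLen.getD (PySem.Str.len q) []).filter
      (fun w => PySem.Chars.startswith w.toList (pvPrefix q.toList))]) []

-- ===== PRECONDITION & SPEC =====
def Spec_solution (words : List String) (queries : List String) (out : List (List String)) : Prop := out = solution_alt words queries
instance (words : List String) (queries : List String) (out : List (List String)) : Decidable (Spec_solution words queries out) := by unfold Spec_solution; infer_instance

-- ===== CLAIM (what is proved, stated in full; the proofs are below) =====
def Claim_equal_solution : Prop := ∀ (words : List String) (queries : List String), Dom_solution words queries → Spec_solution words queries (solution words queries)

-- ===== LEMMAS AND PROOFS =====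

-- the bucket for length L holds exactly the words of length L, in order
theorem pv_bucket (words : List String) (L : Int) :
    (words.foldl (fun d w => d.modify (PySem.Str.len w) [] (fun l => l ++ [w])) PySem.Dict.empty).getD L []
      = words.filter (fun w => PySem.Str.len w == L) := by
  have h : words.foldl (fun d w => d.modify (PySem.Str.len w) [] (fun l => l ++ [w])) PySem.Dict.empty
      = ((words.map (fun w => (PySem.Str.len w, w))).foldl
          (fun (d : PySem.Dict Int (List String)) p => d.modify p.1 [] (fun l => l ++ [p.2])) PySem.Dict.empty) :=
    by rw [List.foldl_map]
  rw [h, PySem.Dict.getD_foldl_modify_append, PySem.Dict.getD_empty]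
  simp [List.filter_map, List.map_map, Function.comp_def]

-- A's per-character loop agrees with startswith on the pre-'?' prefix when lengths match
theorem pv_right_eq (q : List Char) : ∀ w : List Char, q.length = w.length →
    pvRight q w = PySem.Chars.startswith w (pvPrefix q) := by
  induction q with
  | nil => intro w hw; cases w with
    | nil => simp [pvRight, pvPrefix, PySem.Chars.startswith]
    | cons x ws => simp at hw
  | cons c cs ih => intro w hw; cases w with
    | nil => simp at hw
    | cons x ws =>
      simp only [List.length_cons, Nat.add_right_cancel_iff] at hw
      by_cases hq : c = '?'
      · subst hq; simp [pvRight, pvPrefix, PySem.Chars.startswith]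
      · by_cases hx : c = x
        · subst hx
          simp [pvRight, pvPrefix, hq, PySem.Chars.startswith, ih ws hw]
        · simp [pvRight, pvPrefix, hq, hx, PySem.Chars.startswith, List.isPrefixOf]

-- one query: A's scan over all words = B's filter of the length bucket
theorem pv_query (words : List String) (q : String) :
    words.foldl (fun solve word =>
        if PySem.Str.len q ≠ PySem.Str.len word then solve
        else if pvRight q.toList word.toList then solve ++ [word]
        else solve) []
      = ((words.foldl (fun d w => d.modify (PySem.Str.len w) [] (fun l => l ++ [w])) PySem.Dict.empty).getD (PySem.Str.len q) []).filter
          (fun w => PySem.Chars.startswith w.toList (pvPrefix q.toList)) := by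
  rw [pv_bucket]
  have hstep : (fun (solve : List String) (word : String) =>
      if PySem.Str.len q ≠ PySem.Str.len word then solve
      else if pvRight q.toList word.toList then solve ++ [word]
      else solve)
    = (fun solve word =>
      if ((PySem.Str.len q == PySem.Str.len word) && pvRight q.toList word.toList) = true
      then solve ++ [word] else solve) := by
    funext solve word
    by_cases hlen : PySem.Str.len q = PySem.Str.len word
    · have hL : q.length = word.length := by simpa [PySem.Str.len] using hlen
      simp [hL]
    · have hL : ¬ q.length = word.length := by simpa [PySem.Str.len] using hlen
      simp [hL]
  rw [hstep, PySem.List.foldl_append_if_eq_filter, List.nil_append, List.filter_filter]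
  refine List.filter_congr ?_
  intro w _
  by_cases hlen : PySem.Str.len q = PySem.Str.len w
  · have hL : q.length = w.length := by simpa [PySem.Str.len] using hlen
    have hl : q.toList.length = w.toList.length := by
      simpa using hL
    simp [hL, pv_right_eq _ _ hl]
  · have hL : ¬ q.length = w.length := by simpa [PySem.Str.len] using hlen
    have h1 : ((q.length : Int) == (w.length : Int)) = false := by
      simp only [beq_eq_false_iff_ne, ne_eq, Nat.cast_inj]; exact hL
    have h2 : ((w.length : Int) == (q.length : Int)) = false := by
      simp only [beq_eq_false_iff_ne, ne_eq, Nat.cast_inj]; exact fun h => hL h.symm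
    simp [h1, h2]

-- ===== VERDICT (by name: the statement is the Claim_ definition above) =====
theorem solution_spec : Claim_equal_solution := by
  intro words queries _
  unfold Spec_solution solution solution_alt
  rw [PySem.List.foldl_append_singleton_eq_map, PySem.List.foldl_append_singleton_eq_map]
  simp only [List.nil_append]
  exact List.map_congr_left (fun q _ => pv_query words q)
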